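-- pv_equiv track=rewrite | github.com/papostolopoulos/code_exercises | checkio.py/elementary.py | sort_tup
-- ===== SOURCE A (Python) =====
-- def sort_tup(tup):
--     dct = {}
--     dict_keys = []
--     result = []
--     for x in tup:
--         absolute = abs(x)
--         dct[absolute] = x
--
--     for x in dct.keys():
--         dict_keys.append(x)
--
--     dict_keys.sort()
--
--     for y in range(0, len(dict_keys)):
--         result.append(dct[dict_keys[y]])
--
--     return result
-- ===== SOURCE B (Python) =====
-- def sort_tup(tup):
--     result = []
--     for x in sorted(tup, key=abs):
--         if result and abs(result[-1]) == abs(x):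
--             result[-1] = x
--         else:
--             result.append(x)
--     return result
-- ===== Notes on version B (the rewrite author's own statement) =====
-- stated objective: alternative
-- what changed: Replaces A's dict-of-last-by-abs plus key sort plus lookup loop with a single stable sort by abs followed by one linear pass that collapses equal-abs runs keeping the last element.
import Mathlib
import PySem

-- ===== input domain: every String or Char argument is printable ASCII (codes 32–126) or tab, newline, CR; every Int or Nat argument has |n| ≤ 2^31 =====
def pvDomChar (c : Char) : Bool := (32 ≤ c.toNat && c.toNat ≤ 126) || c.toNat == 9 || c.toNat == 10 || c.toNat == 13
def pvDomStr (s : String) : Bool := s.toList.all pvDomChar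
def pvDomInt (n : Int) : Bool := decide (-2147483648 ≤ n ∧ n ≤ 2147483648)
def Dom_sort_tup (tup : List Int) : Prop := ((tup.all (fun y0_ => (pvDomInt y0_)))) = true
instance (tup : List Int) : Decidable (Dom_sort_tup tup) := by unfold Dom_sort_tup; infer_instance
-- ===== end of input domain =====

-- B replaces A's dict-of-last-by-abs + key-sort + lookup loop with one stable sort by abs
-- followed by a single pass collapsing equal-abs runs keeping the last element (alternative decomposition).

-- ===== PORT A =====
def sort_tup (tup : List Int) : List Int :=
  -- dct = {}; for x in tup: dct[abs(x)] = x
  let dct : PySem.Dict Int Int :=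
    tup.foldl (fun d x => d.insert |x| x) PySem.Dict.empty
  -- dict_keys = []; for x in dct.keys(): dict_keys.append(x)
  let dict_keys : List Int := dct.keys.foldl (fun acc x => acc ++ [x]) []
  -- dict_keys.sort()
  let dict_keys2 : List Int := PySem.List.sorted dict_keys (fun k => k)
  -- result = []; for y in range(0, len(dict_keys)): result.append(dct[dict_keys[y]])
  -- dct[k]: the key always comes from dct.keys, so KeyError is impossible; getD's default is never read
  (PySem.List.pyRange 0 (PySem.List.len dict_keys2)).foldl
    (fun result y => result ++ [dct.getD (PySem.List.pyGetD dict_keys2 y 0) 0]) []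

-- ===== PORT B =====
def sort_tup_alt (tup : List Int) : List Int :=
  -- result = []
  -- for x in sorted(tup, key=abs):
  --   if result and abs(result[-1]) == abs(x): result[-1] = x
  --   else: result.append(x)
  (PySem.List.sorted tup (fun x => |x|)).foldl
    (fun result x =>
      if result ≠ [] ∧ |PySem.List.pyGetD result (-1) 0| = |x| then
        PySem.List.pySetD result (-1) x
      else result ++ [x]) []

-- ===== PRECONDITION & SPEC =====
def Spec_sort_tup (tup : List Int) (out : List Int) : Prop := out = sort_tup_alt tup
instance (tup : List Int) (out : List Int) : Decidable (Spec_sort_tup tup out) := by unfold Spec_sort_tup; infer_instance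

-- ===== CLAIM (what is proved, stated in full; the proofs are below) =====
def Claim_equal_sort_tup : Prop := ∀ (tup : List Int), Dom_sort_tup tup → Spec_sort_tup tup (sort_tup tup)


-- ===== LEMMAS AND PROOFS =====

-- the distinct absolute values of tup, sorted increasingly
def pvKeys (tup : List Int) : List Int :=
  PySem.List.sorted (PySem.Set.ofList (tup.map (fun x => |x|))) (fun k => k)

-- the elements of tup whose absolute value is a, in original order
def pvBlk (tup : List Int) (a : Int) : List Int := tup.filter (fun x => |x| == a)

-- the common canonical value of both programs
def pvCanon (tup : List Int) : List Int :=
  (pvKeys tup).map (fun a => ((pvBlk tup a).getLast?).getD 0)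

-- B's loop body
def pvStep (result : List Int) (x : Int) : List Int :=
  if result ≠ [] ∧ |PySem.List.pyGetD result (-1) 0| = |x| then
    PySem.List.pySetD result (-1) x
  else result ++ [x]

lemma getLast?_cons_or (x : Int) (l : List Int) :
    (x :: l).getLast? = l.getLast?.or (some x) := by
  cases h : l.getLast? <;> simp [List.getLast?_cons, h]

-- ---- A side ----

lemma dict_fold_get? (tup : List Int) (d : PySem.Dict Int Int) (k : Int) :
    (tup.foldl (fun d x => d.insert |x| x) d).get? k
      = ((tup.filter (fun x => |x| == k)).getLast?).or (d.get? k) := by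
  induction tup generalizing d with
  | nil => simp
  | cons x xs ih =>
    simp only [List.foldl_cons, List.filter_cons]
    rw [ih]
    by_cases h : |x| = k
    · rw [if_pos (by simpa using h), PySem.Dict.get?_insert, if_pos h.symm,
        getLast?_cons_or, Option.or_assoc, Option.some_or]
    · rw [if_neg (by simpa using h), PySem.Dict.get?_insert, if_neg (fun e => h e.symm)]

lemma dict_fold_getD (tup : List Int) (k : Int) :
    (tup.foldl (fun d x => d.insert |x| x) PySem.Dict.empty).getD k 0
      = ((pvBlk tup k).getLast?).getD 0 := by
  rw [PySem.Dict.getD_eq_get?_getD, dict_fold_get?, PySem.Dict.get?_empty, Option.or_none]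
  rfl

lemma result_loop (sk : List Int) (d : PySem.Dict Int Int) :
    (PySem.List.pyRange 0 (PySem.List.len sk)).foldl
      (fun result y => result ++ [d.getD (PySem.List.pyGetD sk y 0) 0]) []
    = sk.map (fun k => d.getD k 0) := by
  rw [PySem.List.foldl_pyRange_pyGetD sk 0 (fun acc v => acc ++ [d.getD v 0]) [] (by norm_num)]
  rw [show ((0:Int).toNat) = 0 from rfl, List.drop_zero,
    PySem.List.foldl_append_singleton_eq_map (fun v => d.getD v 0) sk [], List.nil_append]

lemma sort_tup_eq_canon (tup : List Int) : sort_tup tup = pvCanon tup := by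
  simp only [sort_tup]
  rw [PySem.List.foldl_append_singleton_eq_self, List.nil_append]
  rw [PySem.Dict.keys_foldl_insert_key tup (fun x => |x|) (fun _ x => x) PySem.Dict.empty,
    PySem.Dict.keys_empty, PySem.Set.update_nil_left]
  rw [result_loop]
  simp only [dict_fold_getD]
  rfl

-- ---- B side: stability of the sort ----

lemma insertBy_append (before : Int → Int → Bool) (x : Int) (p q : List Int)
    (h : ∀ y ∈ p, before x y = false) :
    PySem.List.insertBy before x (p ++ q) = p ++ PySem.List.insertBy before x q := by
  induction p with
  | nil => simp
  | cons y p ih =>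
    have hy := h y (List.mem_cons_self ..)
    rw [List.cons_append]
    simp only [PySem.List.insertBy, hy, Bool.false_eq_true, if_false]
    rw [ih (fun z hz => h z (List.mem_cons_of_mem _ hz))]
    rfl

lemma insertBy_head (before : Int → Int → Bool) (x : Int) (l : List Int)
    (h : ∀ hz : l ≠ [], before x (l.head hz) = true) :
    PySem.List.insertBy before x l = x :: l := by
  cases l with
  | nil => simp [PySem.List.insertBy]
  | cons y t =>
    have := h (List.cons_ne_nil y t)
    simp only [List.head_cons] at this
    simp [PySem.List.insertBy, this]

lemma split3 (v : Int) (ks : List Int) (h : ks.Pairwise (· < ·)) :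
    ks = ks.filter (fun a => decide (a < v)) ++ ks.filter (fun a => a == v)
           ++ ks.filter (fun a => decide (v < a)) := by
  induction ks with
  | nil => simp
  | cons a t ih =>
    obtain ⟨ha, ht⟩ := List.pairwise_cons.mp h
    rcases lt_trichotomy a v with hc | hc | hc
    · rw [List.filter_cons_of_pos (by simpa using hc),
        List.filter_cons_of_neg (by simp [ne_of_lt hc]),
        List.filter_cons_of_neg (by simp [not_lt.mpr hc.le])]
      conv_lhs => rw [ih ht]
      simp
    · subst hc
      rw [List.filter_cons_of_neg (by simp),
        List.filter_cons_of_pos (by simp),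
        List.filter_cons_of_neg (by simp),
        List.filter_eq_nil_iff.mpr (fun b hb => by simp [not_lt.mpr (ha b hb).le]),
        List.filter_eq_nil_iff.mpr (fun b hb => by simp [(ha b hb).ne']),
        List.filter_eq_self.mpr (fun b hb => by simpa using ha b hb)]
      simp
    · rw [List.filter_cons_of_neg (by simp [not_lt.mpr hc.le]),
        List.filter_cons_of_neg (by simp [hc.ne']),
        List.filter_cons_of_pos (by simpa using hc),
        List.filter_eq_nil_iff.mpr (fun b hb => by simp [not_lt.mpr (lt_trans hc (ha b hb)).le]),
        List.filter_eq_nil_iff.mpr (fun b hb => by simp [(lt_trans hc (ha b hb)).ne']),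
        List.filter_eq_self.mpr (fun b hb => by simpa using lt_trans hc (ha b hb))]
      simp

lemma filter_eq_of_nodup (v : Int) (ks : List Int) (h : ks.Nodup) :
    ks.filter (fun a => a == v) = if v ∈ ks then [v] else [] := by
  induction ks with
  | nil => simp
  | cons a t ih =>
    obtain ⟨ha, ht⟩ := List.nodup_cons.mp h
    by_cases hv : a = v
    · subst hv
      rw [List.filter_cons_of_pos (by simp),
        List.filter_eq_nil_iff.mpr (fun b hb => by
          simp only [beq_iff_eq]
          exact fun e => ha (e ▸ hb))]
      simp
    · rw [List.filter_cons_of_neg (by simp [hv]), ih ht]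
      simp [List.mem_cons, (Ne.symm hv)]

lemma mem_pvKeys (tup : List Int) (a : Int) :
    a ∈ pvKeys tup ↔ a ∈ tup.map (fun x => |x|) := by
  simp [pvKeys, PySem.List.mem_sorted, PySem.Set.mem_ofList]

lemma pvBlk_ne_nil (tup : List Int) (a : Int) (h : a ∈ tup.map (fun x => |x|)) :
    pvBlk tup a ≠ [] := by
  obtain ⟨x, hx, hxa⟩ := List.mem_map.mp h
  intro he
  have := List.filter_eq_nil_iff.mp he x hx
  simp [hxa] at this

lemma abs_of_mem_pvBlk (tup : List Int) (a y : Int) (h : y ∈ pvBlk tup a) : |y| = a := by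
  simpa using List.of_mem_filter h

lemma pvBlk_append_singleton (tup : List Int) (x a : Int) :
    pvBlk (tup ++ [x]) a = pvBlk tup a ++ if |x| = a then [x] else [] := by
  by_cases h : |x| = a <;>
    simp [pvBlk, List.filter_append, h]

-- stability: the stable sort by abs is the concatenation of the abs-classes in increasing key order
lemma sorted_abs_eq_flatMap (tup : List Int) :
    PySem.List.sorted tup (fun x => |x|) = (pvKeys tup).flatMap (pvBlk tup) := by
  induction tup using List.reverseRecOn with
  | nil => rfl
  | append_singleton tup x ih =>
    have hstep : PySem.List.sorted (tup ++ [x]) (fun y => |y|)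
        = PySem.List.insertBy (fun a b => decide (|a| < |b|)) x
            (PySem.List.sorted tup (fun y => |y|)) := by
      rw [PySem.List.sorted_eq_foldl_insertBy, PySem.List.sorted_eq_foldl_insertBy,
        List.foldl_append]
      rfl
    rw [hstep, ih]
    have hK : (pvKeys tup).Pairwise (· < ·) := PySem.List.sorted_ofList_pairwise_lt _
    have hnodup : (pvKeys tup).Nodup := hK.imp ne_of_lt
    set L := (pvKeys tup).filter (fun a => decide (a < |x|)) with hL
    set M := (pvKeys tup).filter (fun a => a == |x|) with hM
    set R := (pvKeys tup).filter (fun a => decide (|x| < a)) with hR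
    have hsplit : pvKeys tup = L ++ M ++ R := split3 _ _ hK
    have hLlt : ∀ a ∈ L, a < |x| := fun a haL => by simpa using List.of_mem_filter haL
    have hRgt : ∀ a ∈ R, |x| < a := fun a haR => by simpa using List.of_mem_filter haR
    have hLflat : ∀ y ∈ L.flatMap (pvBlk tup), (decide (|x| < |y|)) = false := by
      intro y hy
      obtain ⟨a, haL, hyb⟩ := List.mem_flatMap.mp hy
      have he : |y| = a := abs_of_mem_pvBlk _ _ _ hyb
      simp [he, not_lt.mpr (hLlt a haL).le]
    have hRins : PySem.List.insertBy (fun a b => decide (|a| < |b|)) x (R.flatMap (pvBlk tup))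
        = x :: R.flatMap (pvBlk tup) := by
      apply insertBy_head
      intro hz
      have hh := List.head_mem hz
      obtain ⟨a, haR, hyb⟩ := List.mem_flatMap.mp hh
      have he := abs_of_mem_pvBlk _ _ _ hyb
      simp [he, hRgt a haR]
    have hcongr : ∀ S : List Int, (∀ a ∈ S, a ≠ |x|) →
        S.flatMap (pvBlk (tup ++ [x])) = S.flatMap (pvBlk tup) := by
      intro S hS
      apply List.flatMap_congr
      intro a haS
      rw [pvBlk_append_singleton, if_neg (fun e => hS a haS e.symm), List.append_nil]
    by_cases hmem : |x| ∈ tup.map (fun y => |y|)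
    · have hmemK : |x| ∈ pvKeys tup := (mem_pvKeys tup _).mpr hmem
      have hMe : M = [|x|] := by
        rw [hM, filter_eq_of_nodup _ _ hnodup, if_pos hmemK]
      have hkeys' : pvKeys (tup ++ [x]) = pvKeys tup := by
        unfold pvKeys
        rw [List.map_append]
        simp only [List.map_cons, List.map_nil]
        rw [PySem.Set.ofList_append_singleton,
          PySem.Set.add_of_mem ((PySem.Set.mem_ofList _ _).mpr hmem)]
      rw [hkeys']
      conv_lhs => rw [hsplit, hMe]
      conv_rhs => rw [hsplit, hMe]
      rw [List.flatMap_append, List.flatMap_append,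
        List.flatMap_append, List.flatMap_append,
        hcongr L (fun a haL => (hLlt a haL).ne),
        hcongr R (fun a haR => (hRgt a haR).ne'),
        List.flatMap_singleton, List.flatMap_singleton,
        pvBlk_append_singleton, if_pos rfl]
      rw [List.append_assoc, List.append_assoc,
        insertBy_append _ _ _ _ hLflat,
        insertBy_append _ _ _ _ (fun y hy => by
          have he := abs_of_mem_pvBlk _ _ _ hy
          simp [he]),
        hRins]
      simp
    · have hmemK : |x| ∉ pvKeys tup := fun hc => hmem ((mem_pvKeys tup _).mp hc)
      have hMe : M = [] := by
        rw [hM, filter_eq_of_nodup _ _ hnodup, if_neg hmemK]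
      have hLR : pvKeys tup = L ++ R := by
        conv_lhs => rw [hsplit, hMe]
        simp
      have hblkx : pvBlk tup |x| = [] := by
        apply List.filter_eq_nil_iff.mpr
        intro b hb hbe
        exact hmem (List.mem_map.mpr ⟨b, hb, by simpa using hbe⟩)
      have hkeys' : pvKeys (tup ++ [x]) = L ++ |x| :: R := by
        unfold pvKeys
        rw [List.map_append]
        simp only [List.map_cons, List.map_nil]
        rw [PySem.Set.ofList_append_singleton,
          PySem.Set.add_of_not_mem (fun hc => hmem ((PySem.Set.mem_ofList _ _).mp hc))]
        apply PySem.List.sorted_eq_of_perm_of_pairwise_lt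
        · have h3 : (pvKeys tup).Perm (PySem.Set.ofList (tup.map (fun y => |y|))) := by
            unfold pvKeys
            exact PySem.List.sorted_perm _ _ _
          have h2 : (|x| :: (L ++ R)).Perm
              (PySem.Set.ofList (tup.map (fun y => |y|)) ++ [|x|]) := by
            refine List.Perm.trans ?_ (List.perm_append_singleton _ _).symm
            exact (hLR ▸ h3).cons |x|
          exact List.Perm.trans List.perm_middle h2
        · rw [List.pairwise_append]
          refine ⟨by rw [hL]; exact hK.filter _, ?_, ?_⟩
          · rw [List.pairwise_cons]
            exact ⟨fun b hb => hRgt b hb, by rw [hR]; exact hK.filter _⟩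
          · intro a haL b hb
            rcases List.mem_cons.mp hb with rfl | hbR
            · exact hLlt a haL
            · exact lt_trans (hLlt a haL) (hRgt b hbR)
      rw [hkeys']
      conv_lhs => rw [hLR]
      rw [List.flatMap_append, List.flatMap_append, List.flatMap_cons,
        hcongr L (fun a haL => (hLlt a haL).ne),
        hcongr R (fun a haR => (hRgt a haR).ne'),
        pvBlk_append_singleton, if_pos rfl, hblkx, List.nil_append,
        insertBy_append _ _ _ _ hLflat, hRins]
      simp

-- ---- B side: the collapsing pass ----

lemma set_last (v : Int) (xs : List Int) (h : xs ≠ []) :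
    xs.set (xs.length - 1) v = xs.dropLast ++ [v] := by
  induction xs with
  | nil => simp at h
  | cons x t ih =>
    cases t with
    | nil => rfl
    | cons y t' =>
      have hrec := ih (by simp)
      simp only [List.length_cons, Nat.add_sub_cancel] at hrec ⊢
      simp only [List.set]
      rw [hrec]
      rfl

lemma pySetD_neg_one (xs : List Int) (v : Int) (h : xs ≠ []) :
    PySem.List.pySetD xs (-1) v = xs.dropLast ++ [v] := by
  have hlen : 0 < xs.length := List.length_pos_iff.mpr h
  simp only [PySem.List.pySetD, PySem.List.pySet?, PySem.List.pyIdx?]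
  rw [if_neg (by omega), if_pos (by omega)]
  simp only [Option.map_some, Option.getD_some]
  have : (-(-1 : Int)).toNat = 1 := rfl
  rw [this]
  exact set_last v xs h

lemma foldl_pvStep_run (k : Int) (block : List Int) :
    ∀ acc : List Int, acc ≠ [] → |(acc.getLast?).getD 0| = k →
      (∀ y ∈ block, |y| = k) →
      block.foldl pvStep acc
        = acc.dropLast ++ [((acc.getLast?).getD 0 :: block).getLast?.getD 0] := by
  induction block with
  | nil =>
    intro acc hne _ _
    simp only [List.foldl_nil, List.getLast?_singleton]
    rw [List.getLast?_eq_some_getLast hne]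
    simp only [Option.getD_some]
    exact (List.dropLast_concat_getLast hne).symm
  | cons y rest ih =>
    intro acc hne hk hall
    have hy : |y| = k := hall y (List.mem_cons_self ..)
    simp only [List.foldl_cons]
    have hcc : acc ≠ [] ∧ |PySem.List.pyGetD acc (-1) 0| = |y| := by
      refine ⟨hne, ?_⟩
      have e : acc.getLast hne = (acc.getLast?).getD 0 := by
        rw [List.getLast?_eq_some_getLast hne]; rfl
      rw [PySem.List.pyGetD_neg_one acc 0 hne, e, hk, hy]
    have hcond : pvStep acc y = acc.dropLast ++ [y] := by
      unfold pvStep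
      rw [if_pos hcc]
      exact pySetD_neg_one acc y hne
    rw [hcond, ih (acc.dropLast ++ [y]) (by simp)
      (by rw [List.getLast?_concat]; simpa using hy)
      (fun z hz => hall z (List.mem_cons_of_mem _ hz))]
    rw [List.getLast?_eq_some_getLast hne]
    simp [List.getLast?_cons_cons]

lemma foldl_pvStep_block (k : Int) (block : List Int) (acc : List Int)
    (hb : block ≠ []) (hk : ∀ y ∈ block, |y| = k)
    (hacc : ∀ v, acc.getLast? = some v → |v| < k) :
    block.foldl pvStep acc = acc ++ [(block.getLast?).getD 0] := by
  cases block with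
  | nil => exact absurd rfl hb
  | cons y rest =>
    have hy : |y| = k := hk y (List.mem_cons_self ..)
    simp only [List.foldl_cons]
    have hcond : pvStep acc y = acc ++ [y] := by
      unfold pvStep
      rw [if_neg]
      rintro ⟨hne, habs⟩
      rw [PySem.List.pyGetD_neg_one acc 0 hne] at habs
      have hlt := hacc (acc.getLast hne) (List.getLast?_eq_some_getLast hne)
      rw [habs, hy] at hlt
      exact lt_irrefl k hlt
    rw [hcond, foldl_pvStep_run k rest (acc ++ [y]) (by simp)
      (by rw [List.getLast?_concat]; simpa using hy)
      (fun z hz => hk z (List.mem_cons_of_mem _ hz))]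
    simp

lemma foldl_pvStep_flatMap (tup : List Int) (ks : List Int) :
    ∀ acc : List Int, ks.Pairwise (· < ·) →
      (∀ a ∈ ks, pvBlk tup a ≠ []) →
      (∀ a ∈ ks, ∀ v, acc.getLast? = some v → |v| < a) →
      (ks.flatMap (pvBlk tup)).foldl pvStep acc
        = acc ++ ks.map (fun a => ((pvBlk tup a).getLast?).getD 0) := by
  induction ks with
  | nil => intro acc _ _ _; simp
  | cons a t ih =>
    intro acc hpw hne hacc
    obtain ⟨ha, ht⟩ := List.pairwise_cons.mp hpw
    simp only [List.flatMap_cons, List.foldl_append]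
    rw [foldl_pvStep_block a (pvBlk tup a) acc (hne a (List.mem_cons_self ..))
      (fun y hy => abs_of_mem_pvBlk tup a y hy) (hacc a (List.mem_cons_self ..))]
    rw [ih (acc ++ [(pvBlk tup a).getLast?.getD 0]) ht
      (fun b hb => hne b (List.mem_cons_of_mem _ hb)) ?_]
    · simp
    · intro b hb v hv
      rw [List.getLast?_concat] at hv
      simp only [Option.some.injEq] at hv
      subst hv
      have hbne := hne a (List.mem_cons_self ..)
      have hlast : (pvBlk tup a).getLast?.getD 0 ∈ pvBlk tup a := by
        rw [List.getLast?_eq_some_getLast hbne]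
        exact List.getLast_mem hbne
      have habs : |(pvBlk tup a).getLast?.getD 0| = a := abs_of_mem_pvBlk tup a _ hlast
      rw [habs]
      exact ha b hb

lemma sort_tup_alt_eq_canon (tup : List Int) : sort_tup_alt tup = pvCanon tup := by
  have h0 : sort_tup_alt tup = (PySem.List.sorted tup (fun x => |x|)).foldl pvStep [] := rfl
  rw [h0, sorted_abs_eq_flatMap,
    foldl_pvStep_flatMap tup (pvKeys tup) []
      (by unfold pvKeys; exact PySem.List.sorted_ofList_pairwise_lt _)
      (fun a ha => pvBlk_ne_nil tup a ((mem_pvKeys tup a).mp ha))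
      (fun a _ v hv => by simp at hv)]
  rfl

-- ===== VERDICT (by name: the statement is the Claim_ definition above) =====
theorem sort_tup_spec : Claim_equal_sort_tup := by
  intro tup _
  unfold Spec_sort_tup
  rw [sort_tup_eq_canon, sort_tup_alt_eq_canon]
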